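-- pv_equiv track=rewrite | github.com/dr1m11/GB_PythonHW | HW1/Ex4/main.py | otlom
-- ===== SOURCE A (Python) =====
-- def otlom(n, m, k):
--     if k == n * m:
--         return 'Долька равна размеру шоколада'
--     mal = min(n, m)
--     bol = max(n, m)
--     for i in range(1, mal + 1):
--         if (i * mal) == k:
--             return 'Да'
--     for i in range(1, bol):
--         if (i * bol) == k:
--             return 'Да'
--     return 'Нет'
-- ===== SOURCE B (Python) =====
-- def otlom(n, m, k):
--     if k == n * m:
--         return 'Долька равна размеру шоколада'
--     mal = min(n, m)
--     bol = max(n, m)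
--     if mal >= 1 and k % mal == 0 and 1 <= k // mal <= mal:
--         return 'Да'
--     if bol >= 2 and k % bol == 0 and 1 <= k // bol <= bol - 1:
--         return 'Да'
--     return 'Нет'
-- ===== Notes on version B (the rewrite author's own statement) =====
-- stated objective: faster
-- what changed: Replaced the two linear scans over range(1, min(n,m)+1) and range(1, max(n,m)) by O(1) divisibility and quotient-range checks.
import Mathlib
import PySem

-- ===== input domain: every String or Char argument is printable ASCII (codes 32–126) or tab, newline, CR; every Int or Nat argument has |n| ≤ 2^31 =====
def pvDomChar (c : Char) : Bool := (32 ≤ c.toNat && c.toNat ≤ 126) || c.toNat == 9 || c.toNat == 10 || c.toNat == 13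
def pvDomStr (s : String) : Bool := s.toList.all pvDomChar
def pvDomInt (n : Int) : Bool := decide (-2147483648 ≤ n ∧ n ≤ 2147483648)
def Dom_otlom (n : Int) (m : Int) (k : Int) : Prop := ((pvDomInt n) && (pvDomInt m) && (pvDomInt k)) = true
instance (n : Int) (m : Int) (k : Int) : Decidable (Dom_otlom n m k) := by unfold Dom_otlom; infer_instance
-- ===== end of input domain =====

-- B replaces A's two linear scans by O(1) divisibility and quotient-range arithmetic (faster, asymptotic).


-- ===== PORT A =====
-- the early-returning 'for' loops become 'any' over the same range
def otlom (n : Int) (m : Int) (k : Int) : String :=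
  if k = n * m then "Долька равна размеру шоколада"
  else
    let mal := min n m
    let bol := max n m
    if (PySem.List.pyRange 1 (mal + 1) 1).any (fun i => i * mal == k) then "Да"
    else if (PySem.List.pyRange 1 bol 1).any (fun i => i * bol == k) then "Да"
    else "Нет"

-- ===== PORT B =====
def otlom_alt (n : Int) (m : Int) (k : Int) : String :=
  if k = n * m then "Долька равна размеру шоколада"
  else
    let mal := min n m
    let bol := max n m
    if 1 ≤ mal ∧ PySem.Int.mod k mal = 0 ∧ 1 ≤ PySem.Int.floordiv k mal ∧ PySem.Int.floordiv k mal ≤ mal then "Да"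
    else if 2 ≤ bol ∧ PySem.Int.mod k bol = 0 ∧ 1 ≤ PySem.Int.floordiv k bol ∧ PySem.Int.floordiv k bol ≤ bol - 1 then "Да"
    else "Нет"

-- ===== PRECONDITION & SPEC =====
def Spec_otlom (n : Int) (m : Int) (k : Int) (out : String) : Prop := out = otlom_alt n m k
instance (n : Int) (m : Int) (k : Int) (out : String) : Decidable (Spec_otlom n m k out) := by unfold Spec_otlom; infer_instance

-- ===== CLAIM (what is proved, stated in full; the proofs are below) =====
def Claim_equal_otlom : Prop := ∀ (n : Int) (m : Int) (k : Int), Dom_otlom n m k → Spec_otlom n m k (otlom n m k)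

-- ===== LEMMAS AND PROOFS =====

-- A's scan over range(1, b) hits some i with i*c = k  iff  c divides k with quotient in [1, b)
theorem pv_loop_iff (c b k : Int) (hc : 0 < c) :
    ((PySem.List.pyRange 1 b 1).any (fun i => i * c == k) = true) ↔
      (PySem.Int.mod k c = 0 ∧ 1 ≤ PySem.Int.floordiv k c ∧ PySem.Int.floordiv k c < b) := by
  rw [List.any_eq_true]
  constructor
  · rintro ⟨i, hi, hik⟩
    rw [PySem.List.mem_pyRange_one] at hi
    have hik' : i * c = k := by simpa using hik
    have hq : PySem.Int.floordiv k c = i :=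
      (PySem.Int.floordiv_eq_iff_of_pos hc).mpr ⟨le_of_eq hik', by nlinarith⟩
    refine ⟨?_, ?_, ?_⟩
    · rw [PySem.Int.mod_eq_zero_iff_dvd]
      exact ⟨i, by rw [← hik', Int.mul_comm]⟩
    · rw [hq]; exact hi.1
    · rw [hq]; exact hi.2
  · rintro ⟨hm, h1, h2⟩
    refine ⟨PySem.Int.floordiv k c, ?_, ?_⟩
    · rw [PySem.List.mem_pyRange_one]; exact ⟨h1, h2⟩
    · simp only [beq_iff_eq]
      have := PySem.Int.floordiv_mul_add_mod k c
      linarith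

-- if b ≤ 1 the scan over range(1, b) is empty, so it finds nothing
theorem pv_loop_empty (c b k : Int) (hb : b ≤ 1) :
    ((PySem.List.pyRange 1 b 1).any (fun i => i * c == k)) = false := by
  rw [PySem.List.pyRange_one_eq_nil hb]; rfl

-- the second scan, as one step (covers both the empty and the non-empty case)
theorem pv_bol_step (n m k : Int) :
    (if (PySem.List.pyRange 1 (max n m) 1).any (fun i => i * (max n m) == k) then "Да" else "Нет")
      = (if 2 ≤ max n m ∧ PySem.Int.mod k (max n m) = 0 ∧ 1 ≤ PySem.Int.floordiv k (max n m) ∧ PySem.Int.floordiv k (max n m) ≤ max n m - 1 then "Да" else "Нет") := by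
  by_cases h2 : 2 ≤ max n m
  · by_cases hA : (PySem.List.pyRange 1 (max n m) 1).any (fun i => i * (max n m) == k) = true
    · rw [if_pos hA]
      obtain ⟨ha, hb, hc⟩ := (pv_loop_iff (max n m) (max n m) k (by omega)).mp hA
      rw [if_pos ⟨h2, ha, hb, by omega⟩]
    · rw [if_neg hA]
      have hB : ¬(2 ≤ max n m ∧ PySem.Int.mod k (max n m) = 0 ∧ 1 ≤ PySem.Int.floordiv k (max n m) ∧ PySem.Int.floordiv k (max n m) ≤ max n m - 1) :=
        fun h => hA ((pv_loop_iff (max n m) (max n m) k (by omega)).mpr ⟨h.2.1, h.2.2.1, by omega⟩)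
      rw [if_neg hB]
  · rw [pv_loop_empty (max n m) (max n m) k (by omega)]
    have hB : ¬(2 ≤ max n m ∧ PySem.Int.mod k (max n m) = 0 ∧ 1 ≤ PySem.Int.floordiv k (max n m) ∧ PySem.Int.floordiv k (max n m) ≤ max n m - 1) :=
      fun h => h2 h.1
    rw [if_neg hB]
    simp

-- ===== VERDICT (by name: the statement is the Claim_ definition above) =====
theorem otlom_spec : Claim_equal_otlom := by
  intro n m k _
  unfold Spec_otlom otlom otlom_alt
  by_cases hk : k = n * m
  · simp [hk]
  · simp only [if_neg hk]
    by_cases h1 : 1 ≤ min n m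
    · by_cases hA : (PySem.List.pyRange 1 (min n m + 1) 1).any (fun i => i * (min n m) == k) = true
      · rw [if_pos hA]
        obtain ⟨ha, hb, hc⟩ := (pv_loop_iff (min n m) (min n m + 1) k (by omega)).mp hA
        rw [if_pos ⟨h1, ha, hb, by omega⟩]
      · rw [if_neg hA]
        have hB : ¬(1 ≤ min n m ∧ PySem.Int.mod k (min n m) = 0 ∧ 1 ≤ PySem.Int.floordiv k (min n m) ∧ PySem.Int.floordiv k (min n m) ≤ min n m) :=
          fun h => hA ((pv_loop_iff (min n m) (min n m + 1) k (by omega)).mpr ⟨h.2.1, h.2.2.1, by omega⟩)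
        rw [if_neg hB]
        exact pv_bol_step n m k
    · rw [pv_loop_empty (min n m) (min n m + 1) k (by omega)]
      have hB : ¬(1 ≤ min n m ∧ PySem.Int.mod k (min n m) = 0 ∧ 1 ≤ PySem.Int.floordiv k (min n m) ∧ PySem.Int.floordiv k (min n m) ≤ min n m) :=
        fun h => h1 h.1
      rw [if_neg hB]
      simp only [Bool.false_eq_true, if_false]
      exact pv_bol_step n m k
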